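-- pv_equiv track=rewrite | github.com/sachin-dabas/COVID-NINJA | TP-3/Main.py | comboSlicing
-- ===== SOURCE A (Python) =====
-- def comboSlicing(myPoints):
--     d = dict()
--     for i in range(len(myPoints)):
--         if myPoints[i] != (0,0):
--             d[myPoints[i]] = d.get(myPoints[i],0)+1
--
--     #get the number of cut shapes from dictionary
--     bestCount = 0
--     for key in d:
--         if d[key] > bestCount:
--             bestCount = d[key]
--     return bestCount
-- ===== SOURCE B (Python) =====
-- def comboSlicing(myPoints):
--     pts = sorted(p for p in myPoints if p != (0, 0))
--     bestCount = 0
--     run = 0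
--     prev = None
--     for p in pts:
--         if prev == p:
--             run += 1
--         else:
--             run = 1
--             prev = p
--         if run > bestCount:
--             bestCount = run
--     return bestCount
-- ===== Notes on version B (the rewrite author's own statement) =====
-- stated objective: alternative
-- what changed: Replaces hash-based frequency counting (dict of counts, then a max scan over the dict) by sort-then-group: sort the non-(0,0) points (sorted(), no mutation) and take the longest run of equal consecutive points in one linear pass.
import Mathlib
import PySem

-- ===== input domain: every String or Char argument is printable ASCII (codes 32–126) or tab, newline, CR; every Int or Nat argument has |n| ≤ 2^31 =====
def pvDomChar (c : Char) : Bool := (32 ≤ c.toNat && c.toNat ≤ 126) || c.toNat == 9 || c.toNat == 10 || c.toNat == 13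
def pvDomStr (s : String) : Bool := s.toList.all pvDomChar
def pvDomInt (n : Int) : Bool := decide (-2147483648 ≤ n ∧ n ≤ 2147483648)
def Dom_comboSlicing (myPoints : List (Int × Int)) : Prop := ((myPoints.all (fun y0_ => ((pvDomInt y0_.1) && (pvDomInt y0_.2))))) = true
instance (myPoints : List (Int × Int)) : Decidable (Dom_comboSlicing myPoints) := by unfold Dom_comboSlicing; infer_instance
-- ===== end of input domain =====

-- B replaces A's dict-of-counts (built in one pass, then scanned for the max) by sort-then-group:
-- sort the non-(0,0) points without mutating the input and take the longest run of equal
-- consecutive points in one linear pass (objective: alternative algorithm, similar cost).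

-- ===== PORT A =====
-- first loop of A: d[myPoints[i]] = d.get(myPoints[i],0)+1 over i in range(len(myPoints)), guarded by != (0,0)
def pvADict (myPoints : List (Int × Int)) : PySem.Dict (Int × Int) Int :=
  (PySem.List.pyRange 0 (myPoints.length : Int) 1).foldl
    (fun d i =>
      if PySem.List.pyGetD myPoints i (0, 0) ≠ (0, 0) then
        d.insert (PySem.List.pyGetD myPoints i (0, 0))
          (d.getD (PySem.List.pyGetD myPoints i (0, 0)) 0 + 1)
      else d)
    PySem.Dict.empty

def comboSlicing (myPoints : List (Int × Int)) : Int :=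
  -- for key in d: if d[key] > bestCount: bestCount = d[key]
  -- d[key] ported as getD key 0: exact, since key ∈ d.keys so the lookup never raises
  (pvADict myPoints).keys.foldl
    (fun bestCount key =>
      if (pvADict myPoints).getD key 0 > bestCount then (pvADict myPoints).getD key 0 else bestCount)
    0

-- ===== PORT B =====
-- the for-loop of Source B over the sorted list, state (bestCount, run, prev)
def pvAltScan : Int → Int → Option (Int × Int) → List (Int × Int) → Int
  | bestCount, _, _, [] => bestCount
  | bestCount, run, prev, p :: t =>
      let run' := if prev = some p then run + 1 else 1
      pvAltScan (if run' > bestCount then run' else bestCount) run' (some p) t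

def comboSlicing_alt (myPoints : List (Int × Int)) : Int :=
  -- sorted(p for p in myPoints if p != (0,0)): Python's tuple sort = lexicographic two-key sort
  pvAltScan 0 0 none
    (PySem.List.sorted2 (myPoints.filter (fun p => decide (p ≠ (0, 0)))) Prod.fst Prod.snd false)

-- ===== PRECONDITION & SPEC =====
def Spec_comboSlicing (myPoints : List (Int × Int)) (out : Int) : Prop := out = comboSlicing_alt myPoints
instance (myPoints : List (Int × Int)) (out : Int) : Decidable (Spec_comboSlicing myPoints out) := by unfold Spec_comboSlicing; infer_instance

-- ===== CLAIM (what is proved, stated in full; the proofs are below) =====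
def Claim_equal_comboSlicing : Prop := ∀ (myPoints : List (Int × Int)), Dom_comboSlicing myPoints → Spec_comboSlicing myPoints (comboSlicing myPoints)

-- ===== LEMMAS AND PROOFS =====

-- the lexicographic key Python's tuple comparison uses, as a LinearOrder
def pvKey (p : Int × Int) : Lex (Int × Int) := toLex p

theorem pvKey_inj : Function.Injective pvKey := by
  intro a b h
  simpa [pvKey] using congrArg (fun x => ofLex x) h

-- the boolean 'before' of sorted2 is lex-lt under pvKey
theorem pvBefore_eq :
    (fun (a b : Int × Int) => decide (a.1 < b.1) || !decide (b.1 < a.1) && decide (a.2 < b.2))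
      = fun a b => decide (pvKey a < pvKey b) := by
  funext a b
  rw [Bool.eq_iff_iff]
  simp only [pvKey, Bool.or_eq_true, Bool.and_eq_true, Bool.not_eq_true',
    decide_eq_true_iff, decide_eq_false_iff_not, Prod.Lex.toLex_lt_toLex]
  omega

theorem pvFoldl_insertBy_pairwise (xs : List (Int × Int)) :
    ∀ acc : List (Int × Int), acc.Pairwise (fun a b => pvKey a ≤ pvKey b) →
    (xs.foldl (fun acc x => PySem.List.insertBy (fun a b => decide (pvKey a < pvKey b)) x acc) acc).Pairwise
      (fun a b => pvKey a ≤ pvKey b) := by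
  induction xs with
  | nil => intro acc h; exact h
  | cons x t ih =>
      intro acc h
      exact ih _ (PySem.List.insertBy_pairwise_le pvKey x acc h)

theorem pvSorted2_pairwise (xs : List (Int × Int)) :
    (PySem.List.sorted2 xs Prod.fst Prod.snd false).Pairwise
      (fun a b => pvKey a ≤ pvKey b) := by
  have e : PySem.List.sorted2 xs Prod.fst Prod.snd false
      = xs.foldl (fun acc x => PySem.List.insertBy (fun a b => decide (pvKey a < pvKey b)) x acc) [] := by
    unfold PySem.List.sorted2
    rw [← pvBefore_eq]
    rfl
  rw [e]
  exact pvFoldl_insertBy_pairwise xs [] List.Pairwise.nil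

-- 'if c > b then c else b' is 'max b c' on Int
theorem pvIfGt (b c : Int) : (if c > b then c else b) = max b c := by
  split_ifs <;> omega

-- the max-of-counts fold is invariant under permutation of the key list
theorem pvFoldl_max_perm {l l' : List (Int × Int)} (g : (Int × Int) → Int)
    (h : l.Perm l') (b : Int) :
    l.foldl (fun acc k => max acc (g k)) b = l'.foldl (fun acc k => max acc (g k)) b :=
  @List.Perm.foldl_eq _ _ _ _ _ ⟨fun b a a' => by show max (max b (g a)) (g a') = max (max b (g a')) (g a); omega⟩ h b

-- A's value = the max-of-counts fold over the distinct non-(0,0) points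
theorem pvA_eq (myPoints : List (Int × Int)) :
    comboSlicing myPoints
      = (PySem.Set.ofList (myPoints.filter (fun p => decide (p ≠ (0, 0))))).foldl
          (fun acc k => max acc (((myPoints.filter (fun p => decide (p ≠ (0, 0)))).count k : Int))) 0 := by
  have hf : pvADict myPoints
      = PySem.Dict.counter (myPoints.filter (fun p => decide (p ≠ (0, 0)))) := by
    unfold pvADict
    rw [PySem.List.foldl_pyRange_zero_pyGetD' myPoints (0, 0)
      (fun (d : PySem.Dict (Int × Int) Int) x => if x ≠ (0, 0) then d.insert x (d.getD x 0 + 1) else d) PySem.Dict.empty]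
    rw [← PySem.Dict.foldl_insert_getD_add_one_eq_counter, List.foldl_filter]
    exact PySem.List.foldl_congr_mem _ _ _ _ (fun acc x _ => by by_cases h : x = (0, 0) <;> simp [h])
  unfold comboSlicing
  rw [hf, PySem.Dict.keys_counter]
  exact PySem.List.foldl_congr_mem _ _ _ 0
    (fun acc x _ => by rw [PySem.Dict.getD_counter, pvIfGt])

-- decomposition of a key-sorted nonempty list: all copies of the head are at the front
theorem pvSorted_decomp (t : List (Int × Int)) :
    ∀ a : Int × Int, (a :: t).Pairwise (fun x y => pvKey x ≤ pvKey y) →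
      ∃ (n : Nat) (rest : List (Int × Int)),
        a :: t = List.replicate (n + 1) a ++ rest ∧ a ∉ rest ∧
        rest.Pairwise (fun x y => pvKey x ≤ pvKey y) := by
  induction t with
  | nil => intro a _; exact ⟨0, [], rfl, by simp, List.Pairwise.nil⟩
  | cons c t ih =>
      intro a h
      by_cases hca : c = a
      · subst hca
        obtain ⟨n, rest, he, hnm, hp⟩ := ih c h.tail
        exact ⟨n + 1, rest, by rw [List.replicate_succ, List.cons_append, ← he], hnm, hp⟩
      · refine ⟨0, c :: t, rfl, ?_, h.tail⟩
        intro hmem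
        rcases List.mem_cons.mp hmem with h1 | h1
        · exact hca h1.symm
        · have hac : pvKey a ≤ pvKey c := (List.pairwise_cons.mp h).1 c (by simp)
          have hca' : pvKey c ≤ pvKey a := (List.pairwise_cons.mp h.tail).1 a h1
          exact hca (pvKey_inj (le_antisymm hca' hac))

-- scanning a run of m more copies of prev
theorem pvScan_run (m : Nat) :
    ∀ (b r : Int) (a : Int × Int) (t : List (Int × Int)), r ≤ b →
      pvAltScan b r (some a) (List.replicate m a ++ t)
        = pvAltScan (max b (r + m)) (r + m) (some a) t := by
  induction m with
  | zero =>
      intro b r a t h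
      simp only [List.replicate_zero, List.nil_append, Nat.cast_zero, add_zero]
      congr 1
      omega
  | succ m ih =>
      intro b r a t h
      rw [List.replicate_succ, List.cons_append]
      show pvAltScan (if (if (some a : Option (Int × Int)) = some a then r + 1 else 1) > b
          then (if (some a : Option (Int × Int)) = some a then r + 1 else 1) else b)
          (if (some a : Option (Int × Int)) = some a then r + 1 else 1) (some a)
          (List.replicate m a ++ t) = _
      rw [if_pos rfl, pvIfGt, ih (max b (r + 1)) (r + 1) a t (by omega)]
      congr 1 <;> push_cast <;> omega

-- entering a fresh run: prev differs from the head, so the run restarts at 1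
theorem pvScan_start (n : Nat) (b r : Int) (pv : Option (Int × Int)) (a : Int × Int)
    (t : List (Int × Int)) (h : pv ≠ some a) :
    pvAltScan b r pv (List.replicate (n + 1) a ++ t)
      = pvAltScan (max b (n + 1)) (n + 1) (some a) t := by
  rw [List.replicate_succ, List.cons_append]
  show pvAltScan (if (if pv = some a then r + 1 else 1) > b
      then (if pv = some a then r + 1 else 1) else b)
      (if pv = some a then r + 1 else 1) (some a)
      (List.replicate n a ++ t) = _
  rw [if_neg h, pvIfGt, pvScan_run n (max b 1) 1 a t (by omega)]
  congr 1 <;> omega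

-- run-length scan on a key-sorted list = fold of max over the counts of the distinct elements
theorem pvScan_sorted_aux (N : Nat) :
    ∀ (zs : List (Int × Int)) (b r : Int) (pv : Option (Int × Int)), zs.length ≤ N →
      zs.Pairwise (fun a b => pvKey a ≤ pvKey b) →
      (∀ p ∈ zs, pv ≠ some p) →
      pvAltScan b r pv zs
        = (PySem.Set.ofList zs).foldl (fun acc k => max acc ((zs.count k : Int))) b := by
  induction N with
  | zero =>
      intro zs b r pv hlen _ _
      have : zs = [] := List.length_eq_zero_iff.mp (Nat.le_zero.mp hlen)
      subst this; rfl
  | succ N ih =>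
      intro zs b r pv hlen hs hpv
      match zs, hs, hpv with
      | [], _, _ => rfl
      | a :: t, hs, hpv =>
        obtain ⟨n, rest, he, hnm, hp⟩ := pvSorted_decomp t a hs
        have hl2 : (a :: t).length = n + 1 + rest.length := by rw [he]; simp
        rw [he, pvScan_start n b r pv a rest (hpv a (by simp))]
        rw [ih rest (max b (n + 1)) (n + 1) (some a) (by omega) hp
          (fun p hpm heq => hnm ((Option.some.injEq _ _ ▸ heq : a = p) ▸ hpm))]
        have hcnt_a : ((List.replicate (n + 1) a ++ rest).count a : Int) = ((n : Int) + 1) := by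
          rw [List.count_append, List.count_replicate, if_pos (by simp),
            List.count_eq_zero_of_not_mem hnm]
          push_cast; ring
        have hcnt_ne : ∀ k ∈ rest,
            ((List.replicate (n + 1) a ++ rest).count k : Int) = (rest.count k : Int) := by
          intro k hk
          have hka : a ≠ k := fun e => hnm (e ▸ hk)
          rw [List.count_append, List.count_replicate, if_neg (by simp [hka])]
          push_cast; ring
        have hperm : (PySem.Set.ofList (List.replicate (n + 1) a ++ rest)).Perm
            (a :: PySem.Set.ofList rest) := by
          rw [List.perm_ext_iff_of_nodup (PySem.Set.nodup_ofList _)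
            (List.nodup_cons.mpr ⟨fun hm => hnm ((PySem.Set.mem_ofList _ _).mp hm), PySem.Set.nodup_ofList _⟩)]
          intro x
          simp only [PySem.Set.mem_ofList, List.mem_append, List.mem_replicate, List.mem_cons]
          constructor
          · rintro (⟨_, hx⟩ | hx)
            · exact Or.inl hx
            · exact Or.inr hx
          · rintro (hx | hx)
            · exact Or.inl ⟨Nat.succ_ne_zero n, hx⟩
            · exact Or.inr hx
        rw [pvFoldl_max_perm _ hperm b, List.foldl_cons]
        rw [hcnt_a]
        exact (PySem.List.foldl_congr_mem _ _ _ _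
          (fun acc x hx => by rw [hcnt_ne x ((PySem.Set.mem_ofList _ _).mp hx)])).symm

-- ===== VERDICT (by name: the statement is the Claim_ definition above) =====
theorem comboSlicing_spec : Claim_equal_comboSlicing := by
  intro myPoints _
  unfold Spec_comboSlicing comboSlicing_alt
  rw [pvScan_sorted_aux
    (PySem.List.sorted2 (myPoints.filter (fun p => decide (p ≠ (0, 0)))) Prod.fst Prod.snd false).length
    _ 0 0 none le_rfl (pvSorted2_pairwise _) (fun p _ h => by cases h)]
  rw [pvA_eq]
  have hperm := PySem.List.sorted2_perm (myPoints.filter (fun p => decide (p ≠ (0, 0)))) Prod.fst Prod.snd false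
  have hsets : (PySem.Set.ofList (myPoints.filter (fun p => decide (p ≠ (0, 0))))).Perm
      (PySem.Set.ofList (PySem.List.sorted2 (myPoints.filter (fun p => decide (p ≠ (0, 0)))) Prod.fst Prod.snd false)) := by
    rw [List.perm_ext_iff_of_nodup (PySem.Set.nodup_ofList _) (PySem.Set.nodup_ofList _)]
    intro x
    simp only [PySem.Set.mem_ofList]
    exact hperm.mem_iff.symm
  rw [pvFoldl_max_perm _ hsets 0]
  exact PySem.List.foldl_congr_mem _ _ _ 0 (fun acc x _ => by rw [hperm.count_eq])
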